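-- pv_equiv track=rewrite | github.com/geohai/GraVi-T-custom | gravit/datasets/datasets_naive.py | __remove_start_and_end__
-- ===== SOURCE A (Python) =====
-- def __remove_start_and_end__(feature, label):
--     # remove all samples with labels "action_start" and "action_end"
--     keep_indices = [i for i, x in enumerate(label) if x != "action_start"]
--     feature = [feature[i] for i in keep_indices]
--     label = [label[i] for i in keep_indices]
--
--     keep_indices = [i for i, x in enumerate(label) if x != "action_end"]
--     feature = [feature[i] for i in keep_indices]
--     label = [label[i] for i in keep_indices]
--
--     return feature, label
-- ===== SOURCE B (Python) =====
-- def __remove_start_and_end__(feature, label):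
--     # remove all samples with labels "action_start" and "action_end"
--     feat_out, lab_out = [], []
--     for i, x in enumerate(label):
--         if x != "action_start" and x != "action_end":
--             feat_out.append(feature[i])
--             lab_out.append(x)
--     return feat_out, lab_out
-- ===== Notes on version B (the rewrite author's own statement) =====
-- stated objective: simpler
-- what changed: A runs two sequential filter passes, each rebuilding an index list and then rebuilding feature and label from it (six intermediate lists); B is one combined pass over enumerate(label) that appends feature[i] and the label to two accumulators when the label is neither sentinel.
import Mathlib
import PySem

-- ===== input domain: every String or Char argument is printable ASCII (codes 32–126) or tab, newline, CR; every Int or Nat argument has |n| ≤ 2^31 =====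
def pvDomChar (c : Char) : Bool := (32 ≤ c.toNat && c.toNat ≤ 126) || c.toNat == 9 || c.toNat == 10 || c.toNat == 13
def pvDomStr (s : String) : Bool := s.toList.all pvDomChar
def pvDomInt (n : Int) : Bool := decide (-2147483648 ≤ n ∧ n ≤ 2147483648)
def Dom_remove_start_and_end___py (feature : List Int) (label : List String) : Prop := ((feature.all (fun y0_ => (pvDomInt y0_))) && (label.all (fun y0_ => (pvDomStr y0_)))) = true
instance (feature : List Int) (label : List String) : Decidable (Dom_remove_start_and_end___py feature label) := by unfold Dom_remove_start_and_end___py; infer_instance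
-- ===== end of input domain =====

-- B replaces A's two sequential filter passes (each rebuilding an index list, the features and the
-- labels) by one combined pass over enumerate(label); objective: simpler. Return values only.

-- ===== PORT A =====
def remove_start_and_end___py (feature : List Int) (label : List String) : List Int × List String :=
  let keep1 := ((PySem.List.enumerate label 0).filter (fun ix => ix.2 != "action_start")).map (fun ix => ix.1)
  let feature1 := keep1.map (fun i => PySem.List.pyGetD feature i 0)
  let label1 := keep1.map (fun i => PySem.List.pyGetD label i "")
  let keep2 := ((PySem.List.enumerate label1 0).filter (fun ix => ix.2 != "action_end")).map (fun ix => ix.1)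
  let feature2 := keep2.map (fun i => PySem.List.pyGetD feature1 i 0)
  let label2 := keep2.map (fun i => PySem.List.pyGetD label1 i "")
  (feature2, label2)

-- ===== PORT B =====
def remove_start_and_end___py_alt (feature : List Int) (label : List String) : List Int × List String :=
  (PySem.List.enumerate label 0).foldl
    (fun acc ix =>
      if ix.2 != "action_start" && ix.2 != "action_end" then
        (acc.1 ++ [PySem.List.pyGetD feature ix.1 0], acc.2 ++ [ix.2])
      else acc)
    ([], [])

-- ===== PRECONDITION & SPEC =====
-- Pre_ excludes exactly the inputs on which A raises IndexError: some label index kept by the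
-- first pass (label ≠ "action_start") has no corresponding feature entry.
def Pre_remove_start_and_end___py (feature : List Int) (label : List String) : Prop :=
  ∀ i < label.length, label.getD i "" ≠ "action_start" → i < feature.length
instance (feature : List Int) (label : List String) : Decidable (Pre_remove_start_and_end___py feature label) := by unfold Pre_remove_start_and_end___py; infer_instance
def pvWitness_remove_start_and_end___py : List Int × List String :=
  ([1, 2, 3], ["action_start", "a", "action_end"])

def Spec_remove_start_and_end___py (feature : List Int) (label : List String) (out : List Int × List String) : Prop := out = remove_start_and_end___py_alt feature label
instance (feature : List Int) (label : List String) (out : List Int × List String) : Decidable (Spec_remove_start_and_end___py feature label out) := by unfold Spec_remove_start_and_end___py; infer_instance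

-- ===== CLAIM (what is proved, stated in full; the proofs are below) =====
def Claim_equal_remove_start_and_end___py : Prop := ∀ (feature : List Int) (label : List String), Dom_remove_start_and_end___py feature label → Pre_remove_start_and_end___py feature label → Spec_remove_start_and_end___py feature label (remove_start_and_end___py feature label)

-- ===== LEMMAS AND PROOFS =====

theorem pv_enum_shift {α : Type} (l : List α) (s : Int) :
    PySem.List.enumerate l (s + 1) = (PySem.List.enumerate l s).map (fun ix => (ix.1 + 1, ix.2)) := by
  induction l generalizing s with
  | nil => simp [PySem.List.enumerate_nil]
  | cons x l ih => simp [PySem.List.enumerate_cons, ih (s + 1)]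

theorem pv_stage (p : String → Bool) (l : List String) (f : List Int)
    (h : ∀ k < l.length, p (l.getD k "") = true → k < f.length) :
    ((PySem.List.enumerate l 0).filter (fun ix => p ix.2)).map
      (fun ix => (PySem.List.pyGetD f ix.1 0, ix.2))
    = (f.zip l).filter (fun ab => p ab.2) := by
  induction l generalizing f with
  | nil => simp [PySem.List.enumerate_nil]
  | cons x l ih =>
    cases f with
    | nil =>
      have hx : p x = false := by
        by_contra hc
        have hpx : p x = true := by revert hc; cases p x <;> simp
        have := h 0 (by simp) (by simpa using hpx)
        simp at this
      have hnil : List.filter (fun ix => p ix.2) (PySem.List.enumerate l 1) = [] := by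
        apply List.filter_eq_nil_iff.2
        intro ix hix
        rcases (PySem.List.mem_enumerate_iff _ _ _).1 hix with ⟨k, hk, rfl⟩
        have hfalse : p l[k] = false := by
          by_contra hc
          have hpk : p l[k] = true := by revert hc; cases p l[k] <;> simp
          have := h (k + 1) (by simp only [List.length_cons]; omega)
            (by rw [List.getD_cons_succ, List.getD_eq_getElem l "" hk]; exact hpk)
          simp at this
        simp [hfalse]
      rw [PySem.List.enumerate_cons, show (0 : Int) + 1 = 1 from by norm_num,
          List.filter_cons_of_neg (by simp [hx]), hnil]
      simp
    | cons a f =>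
      have hsafe' : ∀ k < l.length, p (l.getD k "") = true → k < f.length := by
        intro k hk hp
        have := h (k + 1) (by simp only [List.length_cons]; omega)
          (by rw [List.getD_cons_succ]; exact hp)
        simp only [List.length_cons] at this
        omega
      have htail : List.map (fun ix => (PySem.List.pyGetD (a :: f) (ix.1 + 1) 0, ix.2))
          (List.filter (fun ix => p ix.2) (PySem.List.enumerate l 0))
          = List.filter (fun ab => p ab.2) (f.zip l) := by
        rw [← ih f hsafe']
        apply List.map_congr_left
        intro ix hix
        rcases (PySem.List.mem_enumerate_iff _ _ _).1 (List.mem_of_mem_filter hix) with ⟨k, hk, rfl⟩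
        have e2 : (0 : Int) + (k : Int) + 1 = ((k + 1 : Nat) : Int) := by push_cast; ring
        have e1 : (0 : Int) + (k : Int) = ((k : Nat) : Int) := by push_cast; ring
        rw [e2, e1]
        simp only [PySem.List.pyGetD_natCast, List.getD_cons_succ]
      rw [PySem.List.enumerate_cons, pv_enum_shift l 0, List.zip_cons_cons]
      by_cases hx : p x = true
      · simp only [List.filter_cons, List.filter_map, List.map_map, List.map_cons, hx,
          if_true, Function.comp_def, PySem.List.pyGetD_zero_cons]
        refine List.cons_eq_cons.2 ⟨rfl, ?_⟩
        simpa [Function.comp_def] using htail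
      · simp only [Bool.not_eq_true] at hx
        simp only [List.filter_cons, List.filter_map, List.map_map, List.map_cons, hx,
          Bool.false_eq_true, if_false, Function.comp_def]
        simpa [Function.comp_def] using htail

-- the single-pass fold of B builds the two filtered/mapped lists
theorem pv_foldl_pair (c : Int × String → Bool) (g1 : Int × String → Int)
    (zs : List (Int × String)) (fs : List Int) (ls : List String) :
    zs.foldl (fun acc ix => if c ix then (acc.1 ++ [g1 ix], acc.2 ++ [ix.2]) else acc) (fs, ls)
    = (fs ++ (zs.filter c).map g1, ls ++ (zs.filter c).map (fun ix => ix.2)) := by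
  induction zs generalizing fs ls with
  | nil => simp
  | cons z zs ih =>
    by_cases hz : c z = true
    · simp [hz, ih]
    · simp only [Bool.not_eq_true] at hz
      simp [hz, ih]

-- label entries read back by index are the enumerated entries themselves
theorem pv_label_getD (l : List String) (ix : Int × String) (hix : ix ∈ PySem.List.enumerate l 0) :
    PySem.List.pyGetD l ix.1 "" = ix.2 := by
  rcases (PySem.List.mem_enumerate_iff _ _ _).1 hix with ⟨k, hk, rfl⟩
  have e1 : (0 : Int) + (k : Int) = ((k : Nat) : Int) := by push_cast; ring
  rw [e1]
  simp only [PySem.List.pyGetD_natCast, List.getD_eq_getElem l "" hk]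

-- the result of A's first pass, as a filter of the zipped lists
def pvF1 (feature : List Int) (label : List String) : List (Int × String) :=
  (feature.zip label).filter (fun ab => ab.2 != "action_start")

theorem pv_aux (feature : List Int) (label : List String)
    (hpre : Pre_remove_start_and_end___py feature label) :
    remove_start_and_end___py feature label = remove_start_and_end___py_alt feature label := by
  have hsafe1 : ∀ k < label.length, (label.getD k "" != "action_start") = true → k < feature.length :=
    fun k hk hp => hpre k hk (by simpa using hp)
  have hsafeb : ∀ k < label.length,
      ((label.getD k "" != "action_start") && (label.getD k "" != "action_end")) = true → k < feature.length := by
    intro k hk hp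
    simp only [Bool.and_eq_true] at hp
    exact hpre k hk (by simpa using hp.1)
  have hF1 : ((PySem.List.enumerate label 0).filter (fun ix => ix.2 != "action_start")).map
        (fun ix => (PySem.List.pyGetD feature ix.1 0, ix.2)) = pvF1 feature label := by
    rw [pvF1]
    exact pv_stage (fun s => s != "action_start") label feature hsafe1
  have hFb : ((PySem.List.enumerate label 0).filter (fun ix => ix.2 != "action_start" && ix.2 != "action_end")).map
        (fun ix => (PySem.List.pyGetD feature ix.1 0, ix.2))
      = (feature.zip label).filter (fun ab => ab.2 != "action_start" && ab.2 != "action_end") :=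
    pv_stage (fun s => s != "action_start" && s != "action_end") label feature hsafeb
  -- characterize B
  have hB : remove_start_and_end___py_alt feature label
      = (((feature.zip label).filter (fun ab => ab.2 != "action_start" && ab.2 != "action_end")).map Prod.fst,
         ((feature.zip label).filter (fun ab => ab.2 != "action_start" && ab.2 != "action_end")).map Prod.snd) := by
    unfold remove_start_and_end___py_alt
    rw [pv_foldl_pair (fun ix => ix.2 != "action_start" && ix.2 != "action_end")
        (fun ix => PySem.List.pyGetD feature ix.1 0) (PySem.List.enumerate label 0) [] []]
    rw [← hFb]
    simp [List.map_map, Function.comp_def]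
  -- characterize A, stage 1
  have hfeat1 : (((PySem.List.enumerate label 0).filter (fun ix => ix.2 != "action_start")).map (fun ix => ix.1)).map
        (fun i => PySem.List.pyGetD feature i 0) = (pvF1 feature label).map Prod.fst := by
    rw [← hF1]
    simp [List.map_map, Function.comp_def]
  have hlab1 : (((PySem.List.enumerate label 0).filter (fun ix => ix.2 != "action_start")).map (fun ix => ix.1)).map
        (fun i => PySem.List.pyGetD label i "") = (pvF1 feature label).map Prod.snd := by
    rw [← hF1]
    simp only [List.map_map, Function.comp_def]
    exact List.map_congr_left (fun ix hix => by
      have := pv_label_getD label ix (List.mem_of_mem_filter hix)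
      simp [this])
  -- stage 2 runs over two lists of equal length, so indexing is safe with no assumption
  have hsafe2 : ∀ k < ((pvF1 feature label).map Prod.snd).length,
      (((pvF1 feature label).map Prod.snd).getD k "" != "action_end") = true
      → k < ((pvF1 feature label).map Prod.fst).length := by
    intro k hk _
    simp only [List.length_map] at hk ⊢
    exact hk
  have hF2 : ((PySem.List.enumerate ((pvF1 feature label).map Prod.snd) 0).filter (fun ix => ix.2 != "action_end")).map
        (fun ix => (PySem.List.pyGetD ((pvF1 feature label).map Prod.fst) ix.1 0, ix.2))
      = (((pvF1 feature label).map Prod.fst).zip ((pvF1 feature label).map Prod.snd)).filter (fun ab => ab.2 != "action_end") :=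
    pv_stage (fun s => s != "action_end") _ _ hsafe2
  have hzipF : ((pvF1 feature label).map Prod.fst).zip ((pvF1 feature label).map Prod.snd) = pvF1 feature label := by
    rw [List.zip_map']
    simp
  have hF2' : ((PySem.List.enumerate ((pvF1 feature label).map Prod.snd) 0).filter (fun ix => ix.2 != "action_end")).map
        (fun ix => (PySem.List.pyGetD ((pvF1 feature label).map Prod.fst) ix.1 0, ix.2))
      = (pvF1 feature label).filter (fun ab => ab.2 != "action_end") := by
    rw [hF2, hzipF]
  have hfilter2 : (pvF1 feature label).filter (fun ab => ab.2 != "action_end")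
      = (feature.zip label).filter (fun ab => ab.2 != "action_start" && ab.2 != "action_end") := by
    rw [pvF1, List.filter_filter]
    exact List.filter_congr (fun ab _ => Bool.and_comm _ _)
  have hfeat2 : (((PySem.List.enumerate ((pvF1 feature label).map Prod.snd) 0).filter (fun ix => ix.2 != "action_end")).map (fun ix => ix.1)).map
        (fun i => PySem.List.pyGetD ((pvF1 feature label).map Prod.fst) i 0)
      = ((pvF1 feature label).filter (fun ab => ab.2 != "action_end")).map Prod.fst := by
    rw [← hF2']
    simp [List.map_map, Function.comp_def]
  have hlab2 : (((PySem.List.enumerate ((pvF1 feature label).map Prod.snd) 0).filter (fun ix => ix.2 != "action_end")).map (fun ix => ix.1)).map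
        (fun i => PySem.List.pyGetD ((pvF1 feature label).map Prod.snd) i "")
      = ((pvF1 feature label).filter (fun ab => ab.2 != "action_end")).map Prod.snd := by
    rw [← hF2']
    simp only [List.map_map, Function.comp_def]
    exact List.map_congr_left (fun ix hix => by
      have := pv_label_getD ((pvF1 feature label).map Prod.snd) ix (List.mem_of_mem_filter hix)
      simp [this])
  -- assemble
  unfold remove_start_and_end___py
  simp only []
  rw [hfeat1, hlab1, hfeat2, hlab2, hfilter2, hB]

-- ===== VERDICT (by name: the statement is the Claim_ definition above) =====
theorem remove_start_and_end___py_spec : Claim_equal_remove_start_and_end___py := by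
  intro feature label _ hpre
  unfold Spec_remove_start_and_end___py
  exact pv_aux feature label hpre
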